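-- pv_equiv track=rewrite | github.com/510YilinWu/honours-code | Dead/pipeline1_1.py | group_candidates_by_time
-- ===== SOURCE A (Python) =====
-- def group_candidates_by_time(indices, threshold=700):
--     if not indices:
--         return []
--     indices = sorted(indices)
--     groups, current_group = [], [indices[0]]
--     for idx in indices[1:]:
--         if all(abs(idx - existing) <= threshold for existing in current_group):
--             current_group.append(idx)
--         else:
--             groups.append(current_group)
--             current_group = [idx]
--     groups.append(current_group)
--     return groups
-- ===== SOURCE B (Python) =====
-- def group_candidates_by_time(indices, threshold=700):
--     if not indices:
--         return []
--     indices = sorted(indices)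
--     n = len(indices)
--     groups = []
--     i = 0
--     while i < n:
--         limit = indices[i] + threshold
--         # binary search (bisect_right over [i+1, n)) for the end of the group
--         lo, hi = i + 1, n
--         while lo < hi:
--             mid = (lo + hi) // 2
--             if indices[mid] <= limit:
--                 lo = mid + 1
--             else:
--                 hi = mid
--         groups.append(indices[i:lo])
--         i = lo
--     return groups
-- ===== Notes on version B (the rewrite author's own statement) =====
-- stated objective: faster
-- what changed: Instead of testing each element against every member of the growing current group, B sorts once and finds each group's end by binary search on the anchor+threshold bound, slicing whole groups out at once.
import Mathlib
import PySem

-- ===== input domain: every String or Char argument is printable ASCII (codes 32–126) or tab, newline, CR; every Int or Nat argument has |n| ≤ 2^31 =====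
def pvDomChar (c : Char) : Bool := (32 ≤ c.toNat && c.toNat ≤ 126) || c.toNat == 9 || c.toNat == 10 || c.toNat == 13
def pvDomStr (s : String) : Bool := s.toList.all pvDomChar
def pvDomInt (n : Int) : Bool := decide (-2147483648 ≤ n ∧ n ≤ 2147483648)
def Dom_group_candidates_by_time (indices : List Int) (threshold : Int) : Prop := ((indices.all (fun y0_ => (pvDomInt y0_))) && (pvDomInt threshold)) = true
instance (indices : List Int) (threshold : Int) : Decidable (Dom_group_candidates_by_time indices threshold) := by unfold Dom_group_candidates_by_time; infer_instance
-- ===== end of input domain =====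

-- B replaces A's per-element scan of the whole current group by one binary search per group
-- on the sorted list (anchor + threshold bound); same return value, asymptotically faster.

-- ===== PORT A =====
def group_candidates_by_time (indices : List Int) (threshold : Int) : List (List Int) :=
  if indices = [] then []
  else
    match PySem.List.sorted indices (fun x => x) false with
    | [] => []
    | h :: t =>
      -- groups, current_group accumulator; `all(abs(idx - existing) <= threshold ...)`
      let st := t.foldl (fun (st : List (List Int) × List Int) idx =>
        if st.2.all (fun e => decide (|idx - e| ≤ threshold))
        then (st.1, st.2 ++ [idx])
        else (st.1 ++ [st.2], [idx])) (([] : List (List Int)), [h])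
      st.1 ++ [st.2]

-- ===== PORT B =====
-- hand-written bisect_right over s[lo:hi] (Source B's inner while loop, step for step;
-- the fuel argument only guards totality: fuel ≥ hi - lo makes it Source B's loop exactly)
def pvBisect (s : List Int) (limit : Int) : Nat → Nat → Nat → Nat
  | fuel + 1, lo, hi =>
      if lo < hi then
        if s.getD ((lo + hi) / 2) 0 ≤ limit then pvBisect s limit fuel ((lo + hi) / 2 + 1) hi
        else pvBisect s limit fuel lo ((lo + hi) / 2)
      else lo
  | 0, lo, _ => lo

-- Source B's outer while loop (fuel ≥ length - i only guards totality); indices[i:lo] is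
-- (drop i).take (lo - i), exact for 0 ≤ i ≤ lo
def pvGroupLoop (s : List Int) (threshold : Int) : Nat → Nat → List (List Int)
  | fuel + 1, i =>
      if i < s.length then
        ((s.drop i).take (pvBisect s (s.getD i 0 + threshold) s.length (i + 1) s.length - i)) ::
          pvGroupLoop s threshold fuel (pvBisect s (s.getD i 0 + threshold) s.length (i + 1) s.length)
      else []
  | 0, _ => []

def group_candidates_by_time_alt (indices : List Int) (threshold : Int) : List (List Int) :=
  if indices = [] then []
  else
    pvGroupLoop (PySem.List.sorted indices (fun x => x) false) threshold
      (PySem.List.sorted indices (fun x => x) false).length 0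

-- ===== PRECONDITION & SPEC =====
def Spec_group_candidates_by_time (indices : List Int) (threshold : Int) (out : List (List Int)) : Prop := out = group_candidates_by_time_alt indices threshold
instance (indices : List Int) (threshold : Int) (out : List (List Int)) : Decidable (Spec_group_candidates_by_time indices threshold out) := by unfold Spec_group_candidates_by_time; infer_instance

-- ===== CLAIM (what is proved, stated in full; the proofs are below) =====
def Claim_equal_group_candidates_by_time : Prop := ∀ (indices : List Int) (threshold : Int), Dom_group_candidates_by_time indices threshold → Spec_group_candidates_by_time indices threshold (group_candidates_by_time indices threshold)

-- ===== LEMMAS AND PROOFS =====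

-- common reference form: greedy grouping of a sorted list against its group anchor
def pvSpecGroups (t : Int) : List Int → List (List Int)
  | [] => []
  | a :: rest =>
    (a :: rest.takeWhile (fun x => decide (x ≤ a + t))) ::
      pvSpecGroups t (rest.dropWhile (fun x => decide (x ≤ a + t)))
termination_by l => l.length
decreasing_by
  have := List.length_dropWhile_le (fun x => decide (x ≤ a + t)) rest
  simp; omega

theorem pvBisect_ge (s : List Int) (limit : Int) :
    ∀ (fuel lo hi : Nat), lo ≤ pvBisect s limit fuel lo hi := by
  intro fuel
  induction fuel with
  | zero => intro lo hi; rw [pvBisect]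
  | succ n ih =>
    intro lo hi
    rw [pvBisect]
    split_ifs with h1 h2
    · have := ih ((lo + hi) / 2 + 1) hi; omega
    · exact ih lo ((lo + hi) / 2)
    · exact Nat.le_refl lo

theorem pvBisect_le (s : List Int) (limit : Int) :
    ∀ (fuel lo hi : Nat), lo ≤ hi → pvBisect s limit fuel lo hi ≤ hi := by
  intro fuel
  induction fuel with
  | zero => intro lo hi h; rw [pvBisect]; omega
  | succ n ih =>
    intro lo hi h
    rw [pvBisect]
    split_ifs with h1 h2
    · exact ih ((lo + hi) / 2 + 1) hi (by omega)
    · have := ih lo ((lo + hi) / 2) (by omega); omega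
    · omega

theorem pvMono (s : List Int) (hs : List.Pairwise (· ≤ ·) s) :
    ∀ (p q : Nat) (hp : p < s.length) (hq : q < s.length), p ≤ q → s[p] ≤ s[q] := by
  intro p q hp hq hpq
  rcases Nat.lt_or_ge p q with h | h
  · exact List.pairwise_iff_getElem.mp hs p q hp hq h
  · have : p = q := by omega
    subst this; rfl

theorem pvBisect_spec (s : List Int) (limit : Int) (hs : List.Pairwise (· ≤ ·) s) :
    ∀ (fuel lo hi : Nat), hi - lo ≤ fuel → lo ≤ hi → hi ≤ s.length →
    (∀ k (hk : k < s.length), lo ≤ k → k < pvBisect s limit fuel lo hi → s[k] ≤ limit) ∧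
    (∀ k (hk : k < s.length), pvBisect s limit fuel lo hi ≤ k → k < hi → limit < s[k]) := by
  intro fuel
  induction fuel with
  | zero =>
    intro lo hi h hle hlen
    rw [pvBisect]
    exact ⟨fun k hk h1 h2 => absurd h1 (by omega), fun k hk h1 h2 => absurd h1 (by omega)⟩
  | succ n ih =>
    intro lo hi h hle hlen
    rw [pvBisect]
    split_ifs with h1 h2
    · have hmid : (lo + hi) / 2 < s.length := by omega
      rw [List.getD_eq_getElem s 0 hmid] at h2
      obtain ⟨P1, P2⟩ := ih ((lo + hi) / 2 + 1) hi (by omega) (by omega) hlen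
      refine ⟨fun k hk hk1 hk2 => ?_, P2⟩
      rcases Nat.lt_or_ge k ((lo + hi) / 2 + 1) with hc | hc
      · exact le_trans (pvMono s hs k ((lo + hi) / 2) hk hmid (by omega)) h2
      · exact P1 k hk hc hk2
    · have hmid : (lo + hi) / 2 < s.length := by omega
      rw [List.getD_eq_getElem s 0 hmid] at h2
      rw [not_le] at h2
      obtain ⟨P1, P2⟩ := ih lo ((lo + hi) / 2) (by omega) (by omega) (by omega)
      refine ⟨P1, fun k hk hk1 hk2 => ?_⟩
      rcases Nat.lt_or_ge k ((lo + hi) / 2) with hc | hc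
      · exact P2 k hk hk1 hc
      · exact lt_of_lt_of_le h2 (pvMono s hs ((lo + hi) / 2) k hmid hk hc)
    · exact ⟨fun k hk h1 h2 => absurd h1 (by omega), fun k hk h1 h2 => absurd h1 (by omega)⟩

-- fold of A's step on a sorted list equals the reference grouping
theorem pvFoldA (t : Int) : ∀ (rest : List Int) (a : Int) (g : List Int) (G : List (List Int)),
    List.Pairwise (· ≤ ·) (a :: (g ++ rest)) →
    (let st := rest.foldl (fun (st : List (List Int) × List Int) idx =>
        if st.2.all (fun e => decide (|idx - e| ≤ t))
        then (st.1, st.2 ++ [idx])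
        else (st.1 ++ [st.2], [idx])) (G, a :: g)
     st.1 ++ [st.2])
      = G ++ (a :: (g ++ rest.takeWhile (fun x => decide (x ≤ a + t)))) ::
          pvSpecGroups t (rest.dropWhile (fun x => decide (x ≤ a + t))) := by
  intro rest
  induction rest with
  | nil => intro a g G _; simp [pvSpecGroups]
  | cons idx rest' IH =>
    intro a g G hp
    obtain ⟨ha, hgp⟩ := List.pairwise_cons.mp hp
    obtain ⟨_, hir, hgr⟩ := List.pairwise_append.mp hgp
    have hCe : ∀ e ∈ a :: g, e ≤ idx ∧ a ≤ e := by
      intro e he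
      rcases List.mem_cons.mp he with rfl | he'
      · exact ⟨ha idx (by simp), le_refl e⟩
      · exact ⟨hgr e he' idx (by simp), ha e (by simp [he'])⟩
    by_cases hcond : idx ≤ a + t
    · have hC : ((a :: g).all (fun e => decide (|idx - e| ≤ t))) = true := by
        rw [List.all_eq_true]
        intro e he
        obtain ⟨h1, h2⟩ := hCe e he
        rw [decide_eq_true_iff, abs_of_nonneg (by omega)]
        omega
      simp only [List.foldl_cons, hC, if_true]
      have hstep : ((a :: g) ++ [idx]) = a :: (g ++ [idx]) := by simp
      rw [hstep]
      have hp' : List.Pairwise (· ≤ ·) (a :: ((g ++ [idx]) ++ rest')) := by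
        rw [List.append_assoc]; simpa using hp
      rw [IH a (g ++ [idx]) G hp']
      rw [List.takeWhile_cons_of_pos (by simpa using hcond),
          List.dropWhile_cons_of_pos (by simpa using hcond)]
      simp [List.append_assoc]
    · have hC : ((a :: g).all (fun e => decide (|idx - e| ≤ t))) = false := by
        rw [List.all_eq_false]
        refine ⟨a, by simp, ?_⟩
        have := (hCe a (by simp)).1
        rw [decide_eq_true_iff, abs_of_nonneg (by omega)]
        omega
      simp only [List.foldl_cons, hC, Bool.false_eq_true, if_false]
      have hp' : List.Pairwise (· ≤ ·) (idx :: (([] : List Int) ++ rest')) := by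
        simpa using hir
      rw [IH idx [] (G ++ [a :: g]) hp']
      rw [List.takeWhile_cons_of_neg (by simpa using hcond),
          List.dropWhile_cons_of_neg (by simpa using hcond)]
      rw [pvSpecGroups]
      simp [List.append_assoc]

theorem pvTakeDrop {α : Type} (p : α → Bool) :
    ∀ (l : List α) (m : Nat), (∀ k (hk : k < l.length), k < m → p l[k] = true) →
    (∀ (hm : m < l.length), p l[m] = false) →
    l.takeWhile p = l.take m ∧ l.dropWhile p = l.drop m := by
  intro l
  induction l with
  | nil => intro m _ _; simp
  | cons x xs IH =>
    intro m hall hfail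
    cases m with
    | zero =>
      have hx : p x = false := by simpa using hfail (by simp)
      simp [hx]
    | succ m =>
      have hx : p x = true := by simpa using hall 0 (by simp) (by omega)
      obtain ⟨h1, h2⟩ := IH m
        (fun k hk hkm => by simpa using hall (k + 1) (by simpa using hk) (by omega))
        (fun hm => by simpa using hfail (by simpa using hm))
      rw [List.takeWhile_cons_of_pos hx, List.dropWhile_cons_of_pos hx, h1, h2,
          List.take_succ_cons, List.drop_succ_cons]
      exact ⟨rfl, rfl⟩

theorem pvGroupLoop_eq (s : List Int) (t : Int) (hs : List.Pairwise (· ≤ ·) s) :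
    ∀ (fuel i : Nat), s.length - i ≤ fuel → pvGroupLoop s t fuel i = pvSpecGroups t (s.drop i) := by
  intro fuel
  induction fuel with
  | zero =>
    intro i hfuel
    have hge : s.length ≤ i := by omega
    rw [pvGroupLoop, List.drop_eq_nil_of_le hge, pvSpecGroups]
  | succ n ih =>
    intro i hfuel
    by_cases h : i < s.length
    · rw [pvGroupLoop, if_pos h]
      rw [List.getD_eq_getElem s 0 h]
      have hj_ge := pvBisect_ge s (s[i] + t) s.length (i + 1) s.length
      have hj_le := pvBisect_le s (s[i] + t) s.length (i + 1) s.length (by omega)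
      obtain ⟨P1, P2⟩ := pvBisect_spec s (s[i] + t) hs s.length (i + 1) s.length (by omega) (by omega) le_rfl
      set j := pvBisect s (s[i] + t) s.length (i + 1) s.length with hjdef
      have hdropi : s.drop i = s[i] :: s.drop (i + 1) := (List.getElem_cons_drop h).symm
      obtain ⟨htw, hdw⟩ := pvTakeDrop (fun x => decide (x ≤ s[i] + t)) (s.drop (i + 1)) (j - (i + 1))
        (by
          intro k hk hkm
          rw [List.getElem_drop]
          have hkl : i + 1 + k < s.length := by simp at hk; omega
          exact decide_eq_true (P1 (i + 1 + k) hkl (by omega) (by omega)))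
        (by
          intro hm
          have hjl : j < s.length := by simp at hm; omega
          have := P2 j hjl le_rfl hjl
          rw [List.getElem_drop]
          have heq : i + 1 + (j - (i + 1)) = j := by omega
          simp only [heq]
          simpa using by omega)
      rw [ih j (by omega)]
      rw [hdropi, pvSpecGroups, htw, hdw, List.drop_drop]
      have h1 : i + 1 + (j - (i + 1)) = j := by omega
      rw [h1]
      have h2 : (s.drop i).take (j - i) = s[i] :: (s.drop (i + 1)).take (j - (i + 1)) := by
        rw [hdropi]
        have : j - i = (j - (i + 1)) + 1 := by omega
        rw [this, List.take_succ_cons]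
      rw [← hdropi, h2]
    · rw [pvGroupLoop, if_neg h, List.drop_eq_nil_of_le (by omega), pvSpecGroups]

-- ===== VERDICT (by name: the statement is the Claim_ definition above) =====
theorem group_candidates_by_time_spec : Claim_equal_group_candidates_by_time := by
  intro indices threshold _
  unfold Spec_group_candidates_by_time group_candidates_by_time group_candidates_by_time_alt
  by_cases hnil : indices = []
  · simp [hnil]
  · simp only [if_neg hnil]
    have hsnil : PySem.List.sorted indices (fun x => x) false ≠ [] := by
      simpa [PySem.List.sorted_eq_nil_iff] using hnil
    have hp : List.Pairwise (· ≤ ·) (PySem.List.sorted indices (fun x => x) false) :=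
      PySem.List.sorted_pairwise indices (fun x => x)
    cases hsd : PySem.List.sorted indices (fun x => x) false with
    | nil => exact absurd hsd hsnil
    | cons h tl =>
      rw [hsd] at hp
      have := pvFoldA threshold tl h [] [] (by simpa using hp)
      simp only [List.nil_append] at this ⊢
      rw [this]
      rw [pvGroupLoop_eq _ threshold (hsd ▸ PySem.List.sorted_pairwise indices (fun x => x)) _ 0 (by omega)]
      rw [List.drop_zero, pvSpecGroups]
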